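-- pv_equiv track=rewrite | github.com/jonathanjosef91/LeetCode | old/spiralOrder.py | __takeFrame
-- ===== SOURCE A (Python) =====
-- def __takeFrame(matrix, sr, er, sc, ec):
--     frame = []
--
--     if sr+1 >= er:
--         frame[:] = matrix[sr][sc:ec]
--         return frame
--
--     if sc+1 >= ec:
--         for r in range(sr,er):
--             frame += [matrix[r][sc]]
--         return frame
--
--     for c in range(sc,ec):
--         frame += [matrix[sr][c]]
--     for r in range(sr+1,er):
--         frame += [matrix[r][ec-1]]
--     for c in range(ec-2,sc-1,-1):
--         frame += [matrix[er-1][c]]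
--     for r in range(er-2,sr,-1):
--         frame += [matrix[r][sc]]
--
--     return frame
-- ===== SOURCE B (Python) =====
-- def __takeFrame(matrix, sr, er, sc, ec):
--     if sr + 1 >= er:
--         return matrix[sr][sc:ec]
--     if sc + 1 >= ec:
--         return [matrix[r][sc] for r in range(sr, er)]
--     frame = []
--     r, c, dr, dc = sr, sc, 0, 1
--     for _ in range(2 * ((er - sr) + (ec - sc)) - 4):
--         frame.append(matrix[r][c])
--         nr, nc = r + dr, c + dc
--         if not (sr <= nr < er and sc <= nc < ec):
--             dr, dc = dc, -dr
--             nr, nc = r + dr, c + dc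
--         r, c = nr, nc
--     return frame
-- ===== Notes on version B (the rewrite author's own statement) =====
-- stated objective: alternative
-- what changed: The four explicit directional loops are replaced by a single one-lap perimeter walk driven by a direction vector (dr,dc) that turns right whenever the next step would leave the rectangle, collecting exactly 2*((er-sr)+(ec-sc))-4 cells; the two degenerate guards return a slice / a column comprehension directly.
import Mathlib
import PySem

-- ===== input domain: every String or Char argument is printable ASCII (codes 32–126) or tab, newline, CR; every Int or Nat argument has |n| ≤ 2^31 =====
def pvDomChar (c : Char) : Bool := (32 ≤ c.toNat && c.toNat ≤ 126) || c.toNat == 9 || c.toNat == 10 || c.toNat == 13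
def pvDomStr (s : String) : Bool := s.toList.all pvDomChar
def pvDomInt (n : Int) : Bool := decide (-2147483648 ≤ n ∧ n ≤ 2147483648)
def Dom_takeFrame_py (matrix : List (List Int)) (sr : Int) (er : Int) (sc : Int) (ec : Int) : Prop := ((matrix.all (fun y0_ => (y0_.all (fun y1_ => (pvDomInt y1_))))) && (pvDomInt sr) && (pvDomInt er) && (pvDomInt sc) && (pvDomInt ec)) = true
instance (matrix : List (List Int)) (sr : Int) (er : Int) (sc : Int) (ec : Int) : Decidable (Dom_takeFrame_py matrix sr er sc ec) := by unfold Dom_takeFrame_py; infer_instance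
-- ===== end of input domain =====

-- B replaces A's four directional loops by a single one-lap perimeter walk with a turning
-- direction vector (objective: alternative decomposition, same cost). Return values only;
-- A mutates no argument.

-- ===== PORT A =====
def takeFrame_py (matrix : List (List Int)) (sr : Int) (er : Int) (sc : Int) (ec : Int) : List Int :=
  if sr + 1 ≥ er then
    PySem.List.slice (PySem.List.pyGetD matrix sr []) (some sc) (some ec)
  else if sc + 1 ≥ ec then
    (PySem.List.pyRange sr er 1).foldl
      (fun frame r => frame ++ [PySem.List.pyGetD (PySem.List.pyGetD matrix r []) sc 0]) []
  else
    let frame := (PySem.List.pyRange sc ec 1).foldl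
      (fun frame c => frame ++ [PySem.List.pyGetD (PySem.List.pyGetD matrix sr []) c 0]) []
    let frame := (PySem.List.pyRange (sr+1) er 1).foldl
      (fun frame r => frame ++ [PySem.List.pyGetD (PySem.List.pyGetD matrix r []) (ec-1) 0]) frame
    let frame := (PySem.List.pyRange (ec-2) (sc-1) (-1)).foldl
      (fun frame c => frame ++ [PySem.List.pyGetD (PySem.List.pyGetD matrix (er-1) []) c 0]) frame
    (PySem.List.pyRange (er-2) sr (-1)).foldl
      (fun frame r => frame ++ [PySem.List.pyGetD (PySem.List.pyGetD matrix r []) sc 0]) frame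

-- ===== PORT B =====
def pvCell (matrix : List (List Int)) (r c : Int) : Int :=
  PySem.List.pyGetD (PySem.List.pyGetD matrix r []) c 0

-- the one-lap walk: append the current cell, step by (dr,dc), turning right when the
-- next step would leave the rectangle [sr,er) × [sc,ec); fuel = number of cells collected
def pvWalk (matrix : List (List Int)) (sr er sc ec : Int) :
    Nat → Int → Int → Int → Int → List Int → List Int
  | 0, _, _, _, _, frame => frame
  | n+1, r, c, dr, dc, frame =>
    let frame' := frame ++ [pvCell matrix r c]
    if sr ≤ r + dr ∧ r + dr < er ∧ sc ≤ c + dc ∧ c + dc < ec then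
      pvWalk matrix sr er sc ec n (r + dr) (c + dc) dr dc frame'
    else
      pvWalk matrix sr er sc ec n (r + dc) (c + -dr) dc (-dr) frame'

def takeFrame_py_alt (matrix : List (List Int)) (sr : Int) (er : Int) (sc : Int) (ec : Int) : List Int :=
  if sr + 1 ≥ er then
    PySem.List.slice (PySem.List.pyGetD matrix sr []) (some sc) (some ec)
  else if sc + 1 ≥ ec then
    (PySem.List.pyRange sr er 1).map (fun r => pvCell matrix r sc)
  else
    pvWalk matrix sr er sc ec (2 * ((er - sr) + (ec - sc)) - 4).toNat sr sc 0 1 []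

-- ===== PRECONDITION & SPEC =====
-- Pre_ holds exactly where the Python A returns (no IndexError): every matrix cell the
-- chosen branch reads is a valid Python index pair (negative indices count from the end);
-- constant-row/column segments are stated as closed bounds on the first and last index read.
def pvRowLen (matrix : List (List Int)) (r : Int) : Int :=
  ((PySem.List.pyGetD matrix r []).length : Int)

def Pre_takeFrame_py (matrix : List (List Int)) (sr : Int) (er : Int) (sc : Int) (ec : Int) : Prop :=
  (sr + 1 ≥ er → PySem.Raise.InRange matrix.length sr) ∧
  (sr + 1 < er → sc + 1 ≥ ec →
    (-(matrix.length : Int) ≤ sr ∧ er ≤ (matrix.length : Int)) ∧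
    (∀ r ∈ PySem.List.pyRange sr er 1, PySem.Raise.InRange (pvRowLen matrix r).toNat sc)) ∧
  (sr + 1 < er → sc + 1 < ec →
    (-(matrix.length : Int) ≤ sr ∧ er ≤ (matrix.length : Int)) ∧
    (-(pvRowLen matrix sr) ≤ sc ∧ ec ≤ pvRowLen matrix sr) ∧
    (∀ r ∈ PySem.List.pyRange (sr+1) er 1, PySem.Raise.InRange (pvRowLen matrix r).toNat (ec-1)) ∧
    (-(pvRowLen matrix (er-1)) ≤ sc ∧ ec - 2 < pvRowLen matrix (er-1)) ∧
    (∀ r ∈ PySem.List.pyRange (er-2) sr (-1), PySem.Raise.InRange (pvRowLen matrix r).toNat sc))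

instance (matrix : List (List Int)) (sr : Int) (er : Int) (sc : Int) (ec : Int) : Decidable (Pre_takeFrame_py matrix sr er sc ec) := by
  unfold Pre_takeFrame_py; infer_instance

def pvWitness_takeFrame_py : List (List Int) × Int × Int × Int × Int :=
  ([[1, 2, 3], [4, 5, 6], [7, 8, 9]], 0, 3, 0, 3)

def Spec_takeFrame_py (matrix : List (List Int)) (sr : Int) (er : Int) (sc : Int) (ec : Int) (out : List Int) : Prop := out = takeFrame_py_alt matrix sr er sc ec
instance (matrix : List (List Int)) (sr : Int) (er : Int) (sc : Int) (ec : Int) (out : List Int) : Decidable (Spec_takeFrame_py matrix sr er sc ec out) := by unfold Spec_takeFrame_py; infer_instance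

-- ===== CLAIM (what is proved, stated in full; the proofs are below) =====
def Claim_equal_takeFrame_py : Prop := ∀ (matrix : List (List Int)) (sr : Int) (er : Int) (sc : Int) (ec : Int), Dom_takeFrame_py matrix sr er sc ec → Pre_takeFrame_py matrix sr er sc ec → Spec_takeFrame_py matrix sr er sc ec (takeFrame_py matrix sr er sc ec)

-- ===== LEMMAS AND PROOFS =====

-- walking right along row sr from column c (k+1 cells, then a turn down at column ec-1)
theorem pvWalk_right (matrix : List (List Int)) (sr er sc ec : Int)
    (hr : sr + 1 < er) :
    ∀ (k n : Nat) (c : Int) (frame : List Int), sc ≤ c → c + k = ec - 1 →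
      pvWalk matrix sr er sc ec (k + 1 + n) sr c 0 1 frame =
        pvWalk matrix sr er sc ec n (sr + 1) (ec - 1) 1 0
          (frame ++ (PySem.List.pyRange c ec 1).map (fun j => pvCell matrix sr j)) := by
  intro k
  induction k with
  | zero =>
    intro n c frame hsc hk
    have hc : c = ec - 1 := by omega
    subst hc
    rw [show 0 + 1 + n = n + 1 from by omega]
    simp only [pvWalk]
    rw [if_neg (by omega)]
    rw [PySem.List.pyRange_one_cons (by omega), PySem.List.pyRange_one_eq_nil (by omega)]
    simp
  | succ k ih =>
    intro n c frame hsc hk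
    have h1 : k + 1 + 1 + n = (k + 1 + n) + 1 := by omega
    rw [h1]
    simp only [pvWalk]
    rw [if_pos (by omega)]
    rw [show sr + (0:Int) = sr from by ring]
    rw [ih n (c + 1) _ (by omega) (by omega)]
    rw [PySem.List.pyRange_one_cons (show c < ec by omega)]
    simp

-- walking down column ec-1 from row r (k+1 cells, then a turn left at row er-1)
theorem pvWalk_down (matrix : List (List Int)) (sr er sc ec : Int)
    (hc : sc + 1 < ec) :
    ∀ (k n : Nat) (r : Int) (frame : List Int), sr + 1 ≤ r → r + k = er - 1 →
      pvWalk matrix sr er sc ec (k + 1 + n) r (ec - 1) 1 0 frame =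
        pvWalk matrix sr er sc ec n (er - 1) (ec - 2) 0 (-1)
          (frame ++ (PySem.List.pyRange r er 1).map (fun i => pvCell matrix i (ec - 1))) := by
  intro k
  induction k with
  | zero =>
    intro n r frame hsr hk
    have h : r = er - 1 := by omega
    subst h
    rw [show 0 + 1 + n = n + 1 from by omega]
    simp only [pvWalk]
    rw [if_neg (by omega)]
    rw [PySem.List.pyRange_one_cons (by omega), PySem.List.pyRange_one_eq_nil (by omega)]
    simp [show ec - 1 + -(1:Int) = ec - 2 from by ring]
  | succ k ih =>
    intro n r frame hsr hk
    have h1 : k + 1 + 1 + n = (k + 1 + n) + 1 := by omega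
    rw [h1]
    simp only [pvWalk]
    rw [if_pos (by omega)]
    rw [show ec - 1 + (0:Int) = ec - 1 from by ring]
    rw [ih n (r + 1) _ (by omega) (by omega)]
    rw [PySem.List.pyRange_one_cons (show r < er by omega)]
    simp

-- walking left along row er-1 from column c down to sc (k+1 cells, then a turn up)
theorem pvWalk_left (matrix : List (List Int)) (sr er sc ec : Int)
    (hr : sr + 1 < er) (hc : sc + 1 < ec) :
    ∀ (k n : Nat) (c : Int) (frame : List Int), c = sc + k → c ≤ ec - 2 →
      pvWalk matrix sr er sc ec (k + 1 + n) (er - 1) c 0 (-1) frame =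
        pvWalk matrix sr er sc ec n (er - 2) sc (-1) 0
          (frame ++ (PySem.List.pyRange c (sc - 1) (-1)).map (fun j => pvCell matrix (er - 1) j)) := by
  intro k
  induction k with
  | zero =>
    intro n c frame hk hce
    have h : c = sc := by omega
    subst h
    rw [show 0 + 1 + n = n + 1 from by omega]
    simp only [pvWalk]
    rw [if_neg (by omega)]
    rw [PySem.List.pyRange_neg_one_cons (by omega), PySem.List.pyRange_neg_one_eq_nil (by omega)]
    have : er - 1 + -(1:Int) = er - 2 := by ring
    simp [this]
  | succ k ih =>
    intro n c frame hk hce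
    have h1 : k + 1 + 1 + n = (k + 1 + n) + 1 := by omega
    rw [h1]
    simp only [pvWalk]
    rw [if_pos (by omega)]
    have h2 : c + -(1:Int) = c - 1 := by ring
    rw [h2, show er - 1 + (0:Int) = er - 1 from by ring]
    rw [ih n (c - 1) _ (by omega) (by omega)]
    rw [PySem.List.pyRange_neg_one_cons (show sc - 1 < c by omega)]
    simp

-- walking up column sc from row r = sr + k down to sr + 1 (exactly k cells, fuel runs out)
theorem pvWalk_up (matrix : List (List Int)) (sr er sc ec : Int)
    (hr : sr + 1 < er) (hc : sc + 1 < ec) :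
    ∀ (k : Nat) (r : Int) (frame : List Int), r = sr + k → r ≤ er - 2 →
      pvWalk matrix sr er sc ec k r sc (-1) 0 frame =
        frame ++ (PySem.List.pyRange r sr (-1)).map (fun i => pvCell matrix i sc) := by
  intro k
  induction k with
  | zero =>
    intro r frame hk hre
    have h : r = sr := by omega
    subst h
    rw [PySem.List.pyRange_neg_one_eq_nil (by omega)]
    simp [pvWalk]
  | succ k ih =>
    intro r frame hk hre
    simp only [pvWalk]
    rw [if_pos (by omega)]
    have h2 : r + -(1:Int) = r - 1 := by ring
    rw [h2, show sc + (0:Int) = sc from by ring]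
    rw [ih (r - 1) _ (by omega) (by omega)]
    rw [PySem.List.pyRange_neg_one_cons (show sr < r by omega)]
    simp

theorem takeFrame_eq (matrix : List (List Int)) (sr er sc ec : Int) :
    takeFrame_py matrix sr er sc ec = takeFrame_py_alt matrix sr er sc ec := by
  unfold takeFrame_py takeFrame_py_alt
  by_cases h1 : sr + 1 ≥ er
  · rw [if_pos h1, if_pos h1]
  · rw [if_neg h1, if_neg h1]
    by_cases h2 : sc + 1 ≥ ec
    · rw [if_pos h2, if_pos h2]
      rw [PySem.List.foldl_append_singleton_eq_map]
      simp [pvCell]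
    · rw [if_neg h2, if_neg h2]
      have hr : sr + 1 < er := by omega
      have hc : sc + 1 < ec := by omega
      simp only [PySem.List.foldl_append_singleton_eq_map]
      -- split the walk's fuel into the four segments
      set k1 : Nat := (ec - 1 - sc).toNat with hk1
      set k2 : Nat := (er - sr - 2).toNat with hk2
      set k3 : Nat := (ec - sc - 2).toNat with hk3
      set k4 : Nat := (er - 2 - sr).toNat with hk4
      have hN : (2 * ((er - sr) + (ec - sc)) - 4).toNat = k1 + 1 + (k2 + 1 + (k3 + 1 + k4)) := by
        omega
      rw [hN]
      rw [pvWalk_right matrix sr er sc ec hr k1 _ sc [] (by omega) (by omega)]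
      rw [pvWalk_down matrix sr er sc ec hc k2 _ (sr + 1) _ (by omega) (by omega)]
      rw [pvWalk_left matrix sr er sc ec hr hc k3 _ (ec - 2) _ (by omega) (by omega)]
      rw [pvWalk_up matrix sr er sc ec hr hc k4 (er - 2) _ (by omega) (by omega)]
      simp [pvCell, List.append_assoc]

-- ===== VERDICT (by name: the statement is the Claim_ definition above) =====
theorem takeFrame_py_spec : Claim_equal_takeFrame_py := by
  intro matrix sr er sc ec _ _
  unfold Spec_takeFrame_py
  exact takeFrame_eq matrix sr er sc ec
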